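-- pv_equiv track=rewrite | github.com/aman-arabzadeh/Enhancing-Human-Safety-Using-Computer-Vision-Predictive-Modellins- | utilsNeeded.py | check_nearness
-- ===== SOURCE A (Python) =====
-- def check_nearness(target, specific_object_detections, proximity_threshold=10):
--     """
--     Checks if any specific object detection is near the bounding box of the target without overlapping.
--
--     Args:
--         target (list): List of detections for the target, where each detection is represented as [x1, y1, x2, y2].
--         specific_object_detections (list): List of detections for specific objects, where each detection is represented as [x1, y1, x2, y2].
--         proximity_threshold (int): The pixel distance within which objects are considered near each other.
--
--     Returns:
--         bool: True if any specific object detection is near the target within the proximity threshold, False otherwise.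
--     """
--     for t_values in target:
--         x1_target, y1_target, x2_target, y2_target, *_ = t_values
--
--         for obj_det in specific_object_detections:
--             x1_obj, y1_obj, x2_obj, y2_obj, *_ = obj_det
--
--             # Check if bounding boxes are near without overlapping
--             if (x2_obj < x1_target and (x1_target - x2_obj) <= proximity_threshold) or \
--                     (x1_obj > x2_target and (x1_obj - x2_target) <= proximity_threshold) or \
--                     (y2_obj < y1_target and (y1_target - y2_obj) <= proximity_threshold) or \
--                     (y1_obj > y2_target and (y1_obj - y2_target) <= proximity_threshold):
--                 return True
--
--     return False
-- ===== SOURCE B (Python) =====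
-- def check_nearness(target, specific_object_detections, proximity_threshold=10):
--     # Sort each object coordinate axis once, then answer each target's four
--     # "is there a coordinate in [lo, hi]?" questions by binary search.
--     dets = specific_object_detections
--     x1s = sorted([d[0] for d in dets])
--     y1s = sorted([d[1] for d in dets])
--     x2s = sorted([d[2] for d in dets])
--     y2s = sorted([d[3] for d in dets])
--
--     def has_between(vals, lo, hi):
--         # leftmost index whose value is >= lo (hand-written bisect_left)
--         lo_i, hi_i = 0, len(vals)
--         while lo_i < hi_i:
--             mid = (lo_i + hi_i) // 2
--             if vals[mid] < lo:
--                 lo_i = mid + 1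
--             else:
--                 hi_i = mid
--         return lo_i < len(vals) and vals[lo_i] <= hi
--
--     p = proximity_threshold
--     for t in target:
--         x1, y1, x2, y2 = t[0], t[1], t[2], t[3]
--         if has_between(x2s, x1 - p, x1 - 1) or \
--                 has_between(x1s, x2 + 1, x2 + p) or \
--                 has_between(y2s, y1 - p, y1 - 1) or \
--                 has_between(y1s, y2 + 1, y2 + p):
--             return True
--     return False
-- ===== Notes on version B (the rewrite author's own statement) =====
-- stated objective: faster
-- what changed: Instead of testing every (target, object) pair, B sorts the four object coordinate axes once and answers each target's four proximity-interval queries by binary search.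
-- outside the precondition, e.g. on check_nearness([], [[1]], 10): A returns False, B raises IndexError; on check_nearness([[0, 0, 5, 5]], [[6, 0, 7, 1], [1]], 10): A returns True, B raises IndexError
import Mathlib
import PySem

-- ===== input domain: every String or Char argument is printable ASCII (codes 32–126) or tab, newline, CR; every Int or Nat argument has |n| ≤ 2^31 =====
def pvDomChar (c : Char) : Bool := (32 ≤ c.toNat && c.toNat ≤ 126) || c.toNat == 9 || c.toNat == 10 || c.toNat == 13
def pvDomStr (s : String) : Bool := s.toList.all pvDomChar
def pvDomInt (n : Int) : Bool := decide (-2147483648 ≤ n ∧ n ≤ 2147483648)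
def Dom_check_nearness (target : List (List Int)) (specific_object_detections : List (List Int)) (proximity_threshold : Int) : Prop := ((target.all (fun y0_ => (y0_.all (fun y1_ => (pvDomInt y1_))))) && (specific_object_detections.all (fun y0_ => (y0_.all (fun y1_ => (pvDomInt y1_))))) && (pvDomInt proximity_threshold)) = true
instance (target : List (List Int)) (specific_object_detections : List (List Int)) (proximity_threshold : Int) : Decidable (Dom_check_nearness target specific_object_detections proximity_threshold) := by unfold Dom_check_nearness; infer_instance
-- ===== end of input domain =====

-- B replaces A's all-pairs scan with four sorted coordinate lists queried by binary search
-- per target (measured faster at the large sizes; asymptotically O((T+O) log O) vs O(T*O)).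

-- ===== PORT A =====
-- literal port of A: outer for over targets, inner for over objects, early return = any
def check_nearness (target : List (List Int)) (specific_object_detections : List (List Int)) (proximity_threshold : Int) : Bool :=
  target.any fun t_values =>
    let x1t := t_values.getD 0 0
    let y1t := t_values.getD 1 0
    let x2t := t_values.getD 2 0
    let y2t := t_values.getD 3 0
    specific_object_detections.any fun obj_det =>
      let x1o := obj_det.getD 0 0
      let y1o := obj_det.getD 1 0
      let x2o := obj_det.getD 2 0
      let y2o := obj_det.getD 3 0
      (decide (x2o < x1t) && decide (x1t - x2o ≤ proximity_threshold)) ||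
      (decide (x1o > x2t) && decide (x1o - x2t ≤ proximity_threshold)) ||
      (decide (y2o < y1t) && decide (y1t - y2o ≤ proximity_threshold)) ||
      (decide (y1o > y2t) && decide (y1o - y2t ≤ proximity_threshold))

-- ===== PORT B =====
-- Source B's hand-written bisect_left while-loop (lo_i/hi_i halving); fueled with the list
-- length, which bounds the iteration count since hi_i - lo_i strictly decreases.
def pvBisectLeft (vals : List Int) (x : Int) : Nat :=
  PySem.List.bisectLeftLoop vals x vals.length 0 vals.length

-- Source B's has_between: leftmost index with value ≥ lo, then bounds check against hi
def pvHasBetween (vals : List Int) (lo hi : Int) : Bool :=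
  let i := pvBisectLeft vals lo
  decide (i < vals.length) && decide (vals.getD i 0 ≤ hi)

def check_nearness_alt (target : List (List Int)) (specific_object_detections : List (List Int)) (proximity_threshold : Int) : Bool :=
  let x1s := PySem.List.sorted (specific_object_detections.map fun d => d.getD 0 0) (fun v => v) false
  let y1s := PySem.List.sorted (specific_object_detections.map fun d => d.getD 1 0) (fun v => v) false
  let x2s := PySem.List.sorted (specific_object_detections.map fun d => d.getD 2 0) (fun v => v) false
  let y2s := PySem.List.sorted (specific_object_detections.map fun d => d.getD 3 0) (fun v => v) false
  let p := proximity_threshold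
  target.any fun t =>
    let x1 := t.getD 0 0
    let y1 := t.getD 1 0
    let x2 := t.getD 2 0
    let y2 := t.getD 3 0
    pvHasBetween x2s (x1 - p) (x1 - 1) ||
    pvHasBetween x1s (x2 + 1) (x2 + p) ||
    pvHasBetween y2s (y1 - p) (y1 - 1) ||
    pvHasBetween y1s (y2 + 1) (y2 + p)

-- ===== PRECONDITION & SPEC =====
-- Python A unpacks four coordinates from each detection, so it raises (ValueError) on a
-- detection of length < 4 that its loops reach; Pre_ requires every detection to have ≥ 4
-- entries. This also excludes some inputs where A returns without reaching a short
-- detection (empty target list, or an early True) — there B raises, see claim cites.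
def Pre_check_nearness (target : List (List Int)) (specific_object_detections : List (List Int)) (proximity_threshold : Int) : Prop :=
  (∀ d ∈ target, 4 ≤ d.length) ∧ (∀ d ∈ specific_object_detections, 4 ≤ d.length)
instance (target : List (List Int)) (specific_object_detections : List (List Int)) (proximity_threshold : Int) : Decidable (Pre_check_nearness target specific_object_detections proximity_threshold) := by unfold Pre_check_nearness; infer_instance

def pvWitness_check_nearness : List (List Int) × List (List Int) × Int :=
  ([[0, 0, 2, 2]], [[5, 5, 6, 6]], 10)

def Spec_check_nearness (target : List (List Int)) (specific_object_detections : List (List Int)) (proximity_threshold : Int) (out : Bool) : Prop := out = check_nearness_alt target specific_object_detections proximity_threshold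
instance (target : List (List Int)) (specific_object_detections : List (List Int)) (proximity_threshold : Int) (out : Bool) : Decidable (Spec_check_nearness target specific_object_detections proximity_threshold out) := by unfold Spec_check_nearness; infer_instance

-- ===== CLAIM (what is proved, stated in full; the proofs are below) =====
def Claim_equal_check_nearness : Prop := ∀ (target : List (List Int)) (specific_object_detections : List (List Int)) (proximity_threshold : Int), Dom_check_nearness target specific_object_detections proximity_threshold → Pre_check_nearness target specific_object_detections proximity_threshold → Spec_check_nearness target specific_object_detections proximity_threshold (check_nearness target specific_object_detections proximity_threshold)

-- ===== LEMMAS AND PROOFS =====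

lemma pvHasBetween_spec (l : List Int) (hp : l.Pairwise (· ≤ ·)) (lo hi : Int) :
    pvHasBetween l lo hi = true ↔ ∃ v ∈ l, lo ≤ v ∧ v ≤ hi := by
  have hspec := PySem.List.bisectLeft_spec l lo hp
  obtain ⟨hle, hlt, hge⟩ := hspec
  have hbi : pvBisectLeft l lo = PySem.List.bisectLeft l lo := rfl
  unfold pvHasBetween
  simp only [hbi, Bool.and_eq_true, decide_eq_true_eq]
  constructor
  · rintro ⟨hi1, hi2⟩
    refine ⟨l[PySem.List.bisectLeft l lo], List.getElem_mem _, ?_, ?_⟩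
    · exact hge _ hi1 le_rfl
    · rwa [List.getD_eq_getElem l 0 hi1] at hi2
  · rintro ⟨v, hv, hlov, hvhi⟩
    obtain ⟨j, hj, rfl⟩ := List.getElem_of_mem hv
    have hij : PySem.List.bisectLeft l lo ≤ j := by
      by_contra hcon
      exact absurd (hlt j hj (by omega)) (by omega)
    have hilt : PySem.List.bisectLeft l lo < l.length := lt_of_le_of_lt hij hj
    refine ⟨hilt, ?_⟩
    rw [List.getD_eq_getElem l 0 hilt]
    have hmono : l[PySem.List.bisectLeft l lo] ≤ l[j] := by
      rcases eq_or_lt_of_le hij with h | h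
      · simp [h]
      · exact (List.pairwise_iff_getElem.mp hp) _ _ hilt hj h
    omega

lemma sorted_coord_between (objs : List (List Int)) (f : List Int → Int) (lo hi : Int) :
    pvHasBetween (PySem.List.sorted (objs.map f) (fun v => v) false) lo hi = true ↔
      ∃ o ∈ objs, lo ≤ f o ∧ f o ≤ hi := by
  rw [pvHasBetween_spec _ (PySem.List.sorted_pairwise (objs.map f) (fun v => v))]
  constructor
  · rintro ⟨v, hv, h1, h2⟩
    rw [PySem.List.mem_sorted] at hv
    obtain ⟨o, ho, rfl⟩ := List.mem_map.mp hv
    exact ⟨o, ho, h1, h2⟩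
  · rintro ⟨o, ho, h1, h2⟩
    refine ⟨f o, ?_, h1, h2⟩
    rw [PySem.List.mem_sorted]
    exact List.mem_map.mpr ⟨o, ho, rfl⟩

lemma pvExistsMemOr4 {α : Type} (l : List α) (P Q R S P' Q' R' S' : α → Prop)
    (hP : ∀ o, P o ↔ P' o) (hQ : ∀ o, Q o ↔ Q' o)
    (hR : ∀ o, R o ↔ R' o) (hS : ∀ o, S o ↔ S' o) :
    (∃ o ∈ l, ((P o ∨ Q o) ∨ R o) ∨ S o) ↔
      (((∃ o ∈ l, P' o) ∨ (∃ o ∈ l, Q' o)) ∨ (∃ o ∈ l, R' o)) ∨ (∃ o ∈ l, S' o) := by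
  constructor
  · rintro ⟨o, ho, (((h | h) | h) | h)⟩
    · exact Or.inl (Or.inl (Or.inl ⟨o, ho, (hP o).mp h⟩))
    · exact Or.inl (Or.inl (Or.inr ⟨o, ho, (hQ o).mp h⟩))
    · exact Or.inl (Or.inr ⟨o, ho, (hR o).mp h⟩)
    · exact Or.inr ⟨o, ho, (hS o).mp h⟩
  · rintro (((⟨o, ho, h⟩ | ⟨o, ho, h⟩) | ⟨o, ho, h⟩) | ⟨o, ho, h⟩)
    · exact ⟨o, ho, Or.inl (Or.inl (Or.inl ((hP o).mpr h)))⟩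
    · exact ⟨o, ho, Or.inl (Or.inl (Or.inr ((hQ o).mpr h)))⟩
    · exact ⟨o, ho, Or.inl (Or.inr ((hR o).mpr h))⟩
    · exact ⟨o, ho, Or.inr ((hS o).mpr h)⟩

theorem check_nearness_eq_alt (target objs : List (List Int)) (p : Int) :
    check_nearness target objs p = check_nearness_alt target objs p := by
  unfold check_nearness check_nearness_alt
  rw [Bool.eq_iff_iff]
  simp only [List.any_eq_true, Bool.or_eq_true, Bool.and_eq_true, decide_eq_true_eq,
    sorted_coord_between]
  refine exists_congr fun t => and_congr_right fun _ => ?_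
  exact pvExistsMemOr4 objs _ _ _ _ _ _ _ _
    (fun o => by constructor <;> (intro h; omega)) (fun o => by constructor <;> (intro h; omega))
    (fun o => by constructor <;> (intro h; omega)) (fun o => by constructor <;> (intro h; omega))

-- ===== VERDICT (by name: the statement is the Claim_ definition above) =====
theorem check_nearness_spec : Claim_equal_check_nearness := by
  intro target objs p _ _
  exact check_nearness_eq_alt target objs p
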